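-- pv_equiv track=rewrite | github.com/KumarAmbuj/gfg_greedyalgo_miscellaneous | 13.min no of square.py | findminsquare
-- ===== SOURCE A (Python) =====
-- def findminsquare(a,b):
--     count=0
--     rem=0
--     if a<b:
--         a,b=b,a
--     while(b>0):
--
--         count+=int(a/b)
--         rem=int(a%b)
--         a=b
--         b=rem
--
--     return count
-- ===== SOURCE B (Python) =====
-- def findminsquare(a, b):
--     if a < b:
--         return findminsquare(b, a)
--     if b <= 0:
--         return 0
--     return a // b + findminsquare(b, a % b)
-- ===== Notes on version B (the rewrite author's own statement) =====
-- stated objective: simpler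
-- what changed: Replaced the while-loop with mutable count/rem/swap state by a direct Euclidean recursion (quotient plus recurse on (b, a % b)), using exact integer // and % instead of float-based int(a/b).
import Mathlib
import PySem

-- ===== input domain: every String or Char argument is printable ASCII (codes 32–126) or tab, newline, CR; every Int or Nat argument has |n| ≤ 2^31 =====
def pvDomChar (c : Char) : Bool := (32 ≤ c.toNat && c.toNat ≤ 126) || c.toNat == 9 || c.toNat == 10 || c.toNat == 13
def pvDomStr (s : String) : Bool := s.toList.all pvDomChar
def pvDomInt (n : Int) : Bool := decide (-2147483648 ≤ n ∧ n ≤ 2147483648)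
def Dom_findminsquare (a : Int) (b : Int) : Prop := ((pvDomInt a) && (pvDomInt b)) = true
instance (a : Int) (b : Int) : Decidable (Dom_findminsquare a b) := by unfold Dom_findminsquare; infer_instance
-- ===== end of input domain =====

-- B replaces A's while-loop accumulator by a direct Euclidean recursion (simpler decomposition, same cost).


-- ===== PORT A =====
-- A's while-loop over the state (count, a, b); int(a/b) is PySem.Int.truncdiv (exact here:
-- |a|,|b| ≤ 2^31 < 2^53), int(a%b) is PySem.Int.mod.
def findminsquareLoop (count : Int) (a : Int) (b : Int) : Int :=
  if h : 0 < b then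
    findminsquareLoop (count + PySem.Int.truncdiv a b) b (PySem.Int.mod a b)
  else count
termination_by b.toNat
decreasing_by
  have h1 := PySem.Int.mod_nonneg a h
  have h2 := PySem.Int.mod_lt a h
  omega

def findminsquare (a : Int) (b : Int) : Int :=
  if a < b then findminsquareLoop 0 b a else findminsquareLoop 0 a b

-- ===== PORT B =====
def findminsquare_alt (a : Int) (b : Int) : Int :=
  if h : a < b then findminsquare_alt b a
  else if h2 : b ≤ 0 then 0
  else PySem.Int.floordiv a b + findminsquare_alt b (PySem.Int.mod a b)
termination_by (a.toNat + b.toNat, if a < b then 1 else 0)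
decreasing_by
  · have hba : ¬ b < a := by omega
    apply Prod.Lex.right'
    · omega
    · simp [h, hba]
  · apply Prod.Lex.left
    have h1 := PySem.Int.mod_nonneg a (by omega : (0:Int) < b)
    have h2 := PySem.Int.mod_lt a (by omega : (0:Int) < b)
    omega

-- ===== PRECONDITION & SPEC =====
def Spec_findminsquare (a : Int) (b : Int) (out : Int) : Prop := out = findminsquare_alt a b
instance (a : Int) (b : Int) (out : Int) : Decidable (Spec_findminsquare a b out) := by unfold Spec_findminsquare; infer_instance

-- ===== CLAIM (what is proved, stated in full; the proofs are below) =====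
def Claim_equal_findminsquare : Prop := ∀ (a : Int) (b : Int), Dom_findminsquare a b → Spec_findminsquare a b (findminsquare a b)

-- ===== LEMMAS AND PROOFS =====

theorem truncdiv_eq_floordiv (a b : Int) (ha : 0 ≤ a) (hb : 0 < b) :
    PySem.Int.truncdiv a b = PySem.Int.floordiv a b := by
  unfold PySem.Int.truncdiv PySem.Int.floordiv
  rw [Int.tdiv_eq_ediv_of_nonneg ha, Int.fdiv_eq_ediv_of_nonneg a (le_of_lt hb)]

theorem loop_eq_alt (a b count : Int) (hab : ¬ a < b) :
    findminsquareLoop count a b = count + findminsquare_alt a b := by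
  rw [findminsquareLoop, findminsquare_alt]
  by_cases hb : 0 < b
  · have hr1 := PySem.Int.mod_nonneg a hb
    have hr2 := PySem.Int.mod_lt a hb
    rw [dif_pos hb, dif_neg hab, dif_neg (by omega : ¬ b ≤ 0)]
    rw [loop_eq_alt b (PySem.Int.mod a b) _ (by omega)]
    rw [truncdiv_eq_floordiv a b (by omega) hb]
    ring
  · rw [dif_neg hb, dif_neg hab, dif_pos (by omega : b ≤ 0)]
    omega
termination_by b.toNat
decreasing_by
  have h1 := PySem.Int.mod_nonneg a hb
  have h2 := PySem.Int.mod_lt a hb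
  omega

theorem alt_swap (a b : Int) (h : a < b) : findminsquare_alt a b = findminsquare_alt b a := by
  rw [findminsquare_alt, dif_pos h]

-- ===== VERDICT (by name: the statement is the Claim_ definition above) =====
theorem findminsquare_spec : Claim_equal_findminsquare := by
  intro a b _
  unfold Spec_findminsquare findminsquare
  by_cases hab : a < b
  · rw [if_pos hab, loop_eq_alt b a 0 (by omega), ← alt_swap a b hab]
    ring
  · rw [if_neg hab, loop_eq_alt a b 0 hab]
    ring
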